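-- pv_equiv track=rewrite | github.com/weiyangzen/awesome_algorithms | Algorithms/数学-组合数学-0554-容斥原理/demo.py | inclusion_exclusion_union_size
-- ===== SOURCE A (Python) =====
-- from itertools import combinations, permutations, product
-- from typing import List, Sequence, Set
--
-- def inclusion_exclusion_union_size(universe: Set[int], events: Sequence[Set[int]]) -> int:
--     """Return |A1 ∪ ... ∪ Am| using inclusion-exclusion.
--
--     Args:
--         universe: finite universal set U (used for clipping events into U).
--         events: list of subsets A_i.
--     """
--     m = len(events)
--     if m == 0:
--         return 0
--
--     clipped_events = [set(a) & universe for a in events]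
--     total = 0
--
--     for r in range(1, m + 1):
--         sign = 1 if r % 2 == 1 else -1
--         for idxs in combinations(range(m), r):
--             intersection = set(universe)
--             for idx in idxs:
--                 intersection &= clipped_events[idx]
--                 if not intersection:
--                     break
--             total += sign * len(intersection)
--
--     return total
-- ===== SOURCE B (Python) =====
-- def inclusion_exclusion_union_size(universe, events):
--     union = set()
--     for a in events:
--         union |= set(a) & universe
--     return len(union)
-- ===== Notes on version B (the rewrite author's own statement) =====
-- stated objective: faster
-- what changed: Replaces the exponential inclusion-exclusion enumeration of all 2^m index subsets by directly accumulating the union of the clipped events and returning its cardinality.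
import Mathlib
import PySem

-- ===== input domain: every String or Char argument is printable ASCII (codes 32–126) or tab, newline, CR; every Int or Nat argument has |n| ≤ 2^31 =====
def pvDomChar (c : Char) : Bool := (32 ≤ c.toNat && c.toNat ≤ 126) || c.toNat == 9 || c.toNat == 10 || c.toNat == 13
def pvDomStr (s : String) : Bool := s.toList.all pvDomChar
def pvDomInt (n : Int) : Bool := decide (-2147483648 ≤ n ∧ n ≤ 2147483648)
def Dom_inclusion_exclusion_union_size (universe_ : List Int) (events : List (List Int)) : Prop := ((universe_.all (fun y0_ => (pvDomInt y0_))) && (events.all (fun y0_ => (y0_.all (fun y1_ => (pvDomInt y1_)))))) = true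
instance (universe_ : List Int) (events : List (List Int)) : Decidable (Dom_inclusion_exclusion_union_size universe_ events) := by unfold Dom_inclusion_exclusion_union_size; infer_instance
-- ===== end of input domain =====

-- B replaces A's exponential inclusion-exclusion enumeration of index subsets by directly
-- accumulating the union of the clipped events and returning its cardinality (faster).

-- ===== PORT A =====
-- inner loop 'for idx in idxs: intersection &= clipped_events[idx]; if not intersection: break'
def pvInterLoop (clipped : List (List Int)) : List Int → List Nat → List Int
  | inter, [] => inter
  | inter, idx :: rest =>
      let inter' := PySem.Set.inter inter (clipped.getD idx [])
      if inter' = [] then inter' else pvInterLoop clipped inter' rest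

def inclusion_exclusion_union_size (universe_ : List Int) (events : List (List Int)) : Int :=
  let m := events.length
  if m = 0 then 0
  else
    let clipped := events.map (fun a => PySem.Set.inter (PySem.Set.ofList a) universe_)
    (PySem.List.pyRange 1 ((m : Int) + 1) 1).foldl
      (fun total r =>
        let sign : Int := if r % 2 == 1 then 1 else -1
        (PySem.List.combinations (List.range m) r.toNat).foldl
          (fun total idxs =>
            total + sign * PySem.Set.len (pvInterLoop clipped (PySem.Set.ofList universe_) idxs))
          total)
      0

-- ===== PORT B =====
def inclusion_exclusion_union_size_alt (universe_ : List Int) (events : List (List Int)) : Int :=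
  PySem.Set.len
    (events.foldl
      (fun union a => PySem.Set.union union (PySem.Set.inter (PySem.Set.ofList a) universe_))
      (PySem.Set.empty : PySem.Set Int))

-- ===== PRECONDITION & SPEC =====
def Spec_inclusion_exclusion_union_size (universe_ : List Int) (events : List (List Int)) (out : Int) : Prop := out = inclusion_exclusion_union_size_alt universe_ events
instance (universe_ : List Int) (events : List (List Int)) (out : Int) : Decidable (Spec_inclusion_exclusion_union_size universe_ events out) := by unfold Spec_inclusion_exclusion_union_size; infer_instance

-- ===== CLAIM (what is proved, stated in full; the proofs are below) =====
def Claim_equal_inclusion_exclusion_union_size : Prop := ∀ (universe_ : List Int) (events : List (List Int)), Dom_inclusion_exclusion_union_size universe_ events → Spec_inclusion_exclusion_union_size universe_ events (inclusion_exclusion_union_size universe_ events)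

-- ===== LEMMAS AND PROOFS =====

-- membership in A's intersection loop (the break does not change the value: it only stops once empty)
theorem pvInterLoop_mem (clipped : List (List Int)) (c : List Nat) (inter : List Int) (x : Int) :
    x ∈ pvInterLoop clipped inter c ↔ x ∈ inter ∧ ∀ i ∈ c, x ∈ clipped.getD i [] := by
  induction c generalizing inter with
  | nil => simp [pvInterLoop]
  | cons idx rest ih =>
    simp only [pvInterLoop]
    by_cases h : PySem.Set.inter inter (clipped.getD idx []) = []
    · rw [if_pos h, h]
      simp only [List.not_mem_nil, false_iff, not_and]
      intro hx hall
      have hx' : x ∈ PySem.Set.inter inter (clipped.getD idx []) :=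
        (PySem.Set.mem_inter inter (clipped.getD idx []) x).mpr ⟨hx, hall idx (by simp)⟩
      rw [h] at hx'; exact absurd hx' (List.not_mem_nil)
    · rw [if_neg h, ih, PySem.Set.mem_inter]
      simp only [List.forall_mem_cons]
      tauto

theorem pvInterLoop_nodup (clipped : List (List Int)) (c : List Nat) (inter : List Int)
    (h : inter.Nodup) : (pvInterLoop clipped inter c).Nodup := by
  induction c generalizing inter with
  | nil => exact h
  | cons idx rest ih =>
    simp only [pvInterLoop]
    by_cases h' : PySem.Set.inter inter (clipped.getD idx []) = []
    · rw [if_pos h', h']; exact List.nodup_nil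
    · rw [if_neg h']; exact ih _ (PySem.Set.nodup_inter _ _ h)

-- a nodup list whose membership is "x ∈ U and p x" has length U.countP p
theorem pvCard_eq_countP (S U : List Int) (p : Int → Bool) (hS : S.Nodup) (hU : U.Nodup)
    (hmem : ∀ x, x ∈ S ↔ x ∈ U ∧ p x = true) : S.length = U.countP p := by
  have hfin : S.toFinset = (U.filter p).toFinset := by
    ext x; simp [hmem]
  calc S.length = S.toFinset.card := (List.toFinset_card_of_nodup hS).symm
    _ = (U.filter p).toFinset.card := by rw [hfin]
    _ = (U.filter p).length := List.toFinset_card_of_nodup (hU.filter p)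
    _ = U.countP p := List.countP_eq_length_filter.symm

-- number of r-combinations all of whose elements satisfy p
theorem pvCount_combinations {α : Type} (xs : List α) (r : Nat) (p : α → Bool) :
    (PySem.List.combinations xs r).countP (fun c => c.all p) = (xs.countP p).choose r := by
  induction xs generalizing r with
  | nil =>
    cases r with
    | zero => simp [PySem.List.combinations_zero]
    | succ r => simp [PySem.List.combinations_nil_succ]
  | cons x xs ih =>
    cases r with
    | zero => simp [PySem.List.combinations_zero]
    | succ r =>
      rw [PySem.List.combinations_cons_succ, List.countP_append, List.countP_map]
      have hcomp : ((fun c => List.all c p) ∘ (fun c => x :: c)) = fun c => p x && c.all p := by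
        funext c; simp [Function.comp, List.all_cons]
      rw [hcomp]
      by_cases hp : p x = true
      · have h1 : (fun c => p x && List.all c p) = fun c => List.all c p := by
          funext c; rw [hp, Bool.true_and]
        rw [h1, ih r, ih (r + 1), List.countP_cons_of_pos hp, Nat.choose_succ_succ]
      · have h1 : (fun c => p x && List.all c p) = fun _ => false := by
          funext c; rw [Bool.eq_false_iff.mpr hp, Bool.false_and]
        rw [h1, List.countP_cons_of_neg (by simp [hp]), ih (r + 1)]
        simp

-- sign of A's r-th round
theorem pvSign (j : Nat) :
    (if ((1 + (j : Int)) % 2 == 1) then (1 : Int) else -1) = (-1 : Int) ^ j := by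
  rcases Nat.even_or_odd j with h | h
  · have h0 : j % 2 = 0 := Nat.even_iff.mp h
    have h1 : (1 + (j : Int)) % 2 = 1 := by omega
    rw [h1, h.neg_one_pow]; simp
  · have h0 : j % 2 = 1 := Nat.odd_iff.mp h
    have h1 : (1 + (j : Int)) % 2 = 0 := by omega
    rw [h1, h.neg_one_pow]; simp

-- a List.range sum is a Finset.range sum
theorem pvListSumRange (m : Nat) (f : Nat → Int) :
    ((List.range m).map f).sum = ∑ j ∈ Finset.range m, f j := by
  induction m with
  | zero => simp
  | succ n ih =>
    rw [List.range_succ, List.map_append, List.sum_append, Finset.sum_range_succ, ih]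
    simp

-- truncated alternating sum of binomial coefficients
theorem pvAltSum (m k : Nat) (hk : k ≤ m) :
    ((List.range m).map (fun j => (-1 : Int) ^ j * (k.choose (j + 1) : Int))).sum
      = if k = 0 then 0 else 1 := by
  rw [pvListSumRange]
  have hsub : ∑ j ∈ Finset.range k, (-1 : Int) ^ j * (k.choose (j + 1) : Int)
      = ∑ j ∈ Finset.range m, (-1 : Int) ^ j * (k.choose (j + 1) : Int) := by
    apply Finset.sum_subset (by intro x hx; rw [Finset.mem_range] at *; omega)
    intro x _ hx
    rw [Finset.mem_range, not_lt] at hx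
    rw [Nat.choose_eq_zero_of_lt (by omega)]
    simp
  rw [← hsub]
  rcases Nat.eq_zero_or_pos k with h0 | hpos
  · subst h0; simp
  · have halt := Int.alternating_sum_range_choose (n := k)
    rw [Finset.sum_range_succ'] at halt
    have hneg : ∑ j ∈ Finset.range k, (-1 : Int) ^ (j + 1) * (k.choose (j + 1) : Int)
        = -∑ j ∈ Finset.range k, (-1 : Int) ^ j * (k.choose (j + 1) : Int) := by
      rw [← Finset.sum_neg_distrib]
      apply Finset.sum_congr rfl
      intro j _
      rw [pow_succ]
      ring
    rw [hneg] at halt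
    have hk0 : k ≠ 0 := by omega
    rw [if_neg hk0] at halt ⊢
    simp at halt
    omega

-- interchange two list sums
theorem pvSum_comm {α β : Type} (l1 : List α) (l2 : List β) (f : α → β → Int) :
    (l1.map (fun a => (l2.map (fun b => f a b)).sum)).sum
      = (l2.map (fun b => (l1.map (fun a => f a b)).sum)).sum := by
  induction l1 with
  | nil => simp
  | cons a l1 ih =>
    simp only [List.map_cons, List.sum_cons, ih, PySem.List.sum_map_add_int]

-- congruence for sums of maps
theorem pvSumCongr {α : Type} (l : List α) {f g : α → Int} (h : ∀ a ∈ l, f a = g a) :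
    (l.map f).sum = (l.map g).sum := by
  rw [List.map_congr_left h]

-- Int.toNat of a 1-shifted cast
theorem pvToNat (j : Nat) : (1 + (j : Int)).toNat = j + 1 := by omega

-- B's fold: membership and nodup
theorem pvUnion_mem (universe_ : List Int) (events : List (List Int)) (acc : List Int) (x : Int) :
    x ∈ events.foldl
        (fun union a => PySem.Set.union union (PySem.Set.inter (PySem.Set.ofList a) universe_)) acc
      ↔ x ∈ acc ∨ ∃ a ∈ events, x ∈ a ∧ x ∈ universe_ := by
  induction events generalizing acc with
  | nil => simp
  | cons a rest ih =>
    simp only [List.foldl_cons, ih, PySem.Set.mem_union, PySem.Set.mem_inter,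
      PySem.Set.mem_ofList, List.mem_cons]
    constructor
    · rintro ((h | ⟨h1, h2⟩) | ⟨b, hb, h1, h2⟩)
      · exact Or.inl h
      · exact Or.inr ⟨a, Or.inl rfl, h1, h2⟩
      · exact Or.inr ⟨b, Or.inr hb, h1, h2⟩
    · rintro (h | ⟨b, (rfl | hb), h1, h2⟩)
      · exact Or.inl (Or.inl h)
      · exact Or.inl (Or.inr ⟨h1, h2⟩)
      · exact Or.inr ⟨b, hb, h1, h2⟩

theorem pvUnion_nodup (universe_ : List Int) (events : List (List Int)) (acc : List Int)
    (h : acc.Nodup) :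
    (events.foldl
        (fun union a => PySem.Set.union union (PySem.Set.inter (PySem.Set.ofList a) universe_)) acc).Nodup := by
  induction events generalizing acc with
  | nil => exact h
  | cons a rest ih =>
    exact ih _ (PySem.Set.nodup_union _ _ h)

-- characterisation of B
theorem pvAlt_char (universe_ : List Int) (events : List (List Int)) :
    inclusion_exclusion_union_size_alt universe_ events
      = ((PySem.Set.ofList universe_).countP (fun x => events.any (fun a => decide (x ∈ a))) : Int) := by
  unfold inclusion_exclusion_union_size_alt
  rw [PySem.Set.len]
  congr 1
  apply pvCard_eq_countP
  · exact pvUnion_nodup universe_ events [] List.nodup_nil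
  · exact PySem.Set.nodup_ofList universe_
  · intro x
    rw [pvUnion_mem, PySem.Set.mem_ofList]
    simp only [PySem.Set.empty, List.not_mem_nil, false_or, List.any_eq_true, decide_eq_true_eq]
    constructor
    · rintro ⟨a, ha, h1, h2⟩
      exact ⟨h2, a, ha, h1⟩
    · rintro ⟨h2, a, ha, h1⟩
      exact ⟨a, ha, h1, h2⟩

-- size of one intersection term of A, as a count over the deduplicated universe
theorem pvTermLen (u : List Int) (clipped : List (List Int)) (c : List Nat) :
    PySem.Set.len (pvInterLoop clipped (PySem.Set.ofList u) c)
      = ((PySem.Set.ofList u).countP (fun x => c.all (fun i => decide (x ∈ clipped.getD i []))) : Int) := by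
  rw [PySem.Set.len]
  congr 1
  apply pvCard_eq_countP _ _ _ (pvInterLoop_nodup _ _ _ (PySem.Set.nodup_ofList u)) (PySem.Set.nodup_ofList u)
  intro x
  rw [pvInterLoop_mem]
  simp [List.all_eq_true]

-- the r-th round of A, as a per-element sum of binomial coefficients
theorem pvInnerSum (U' : List Int) (m j : Nat) (clipped : List (List Int)) :
    ((PySem.List.combinations (List.range m) (j + 1)).map
        (fun c => (-1 : Int) ^ j * ((U'.countP (fun x => c.all (fun i => decide (x ∈ clipped.getD i [])))) : Int))).sum
      = (U'.map (fun x => (-1 : Int) ^ j *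
          ((((List.range m).countP (fun i => decide (x ∈ clipped.getD i []))).choose (j + 1)) : Int))).sum := by
  calc ((PySem.List.combinations (List.range m) (j + 1)).map
        (fun c => (-1 : Int) ^ j * ((U'.countP (fun x => c.all (fun i => decide (x ∈ clipped.getD i [])))) : Int))).sum
      = (-1 : Int) ^ j * ((PySem.List.combinations (List.range m) (j + 1)).map
          (fun c => ((U'.countP (fun x => c.all (fun i => decide (x ∈ clipped.getD i [])))) : Int))).sum :=
        List.sum_map_mul_left _ _ _
    _ = (-1 : Int) ^ j * ((PySem.List.combinations (List.range m) (j + 1)).map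
          (fun c => (U'.map (fun x => if (c.all (fun i => decide (x ∈ clipped.getD i []))) = true then (1 : Int) else 0)).sum)).sum := by
        rw [pvSumCongr (PySem.List.combinations (List.range m) (j + 1))
          (fun c _ => (PySem.List.sum_map_ite_one_zero (fun x => c.all (fun i => decide (x ∈ clipped.getD i []))) U').symm)]
    _ = (-1 : Int) ^ j * (U'.map (fun x => ((PySem.List.combinations (List.range m) (j + 1)).map
          (fun c => if (c.all (fun i => decide (x ∈ clipped.getD i []))) = true then (1 : Int) else 0)).sum)).sum := by
        rw [pvSum_comm]
    _ = (-1 : Int) ^ j * (U'.map (fun x =>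
          ((((List.range m).countP (fun i => decide (x ∈ clipped.getD i []))).choose (j + 1)) : Int))).sum := by
        rw [pvSumCongr U' (fun x _ => by
          rw [PySem.List.sum_map_ite_one_zero, pvCount_combinations])]
    _ = (U'.map (fun x => (-1 : Int) ^ j *
          ((((List.range m).countP (fun i => decide (x ∈ clipped.getD i []))).choose (j + 1)) : Int))).sum :=
        (List.sum_map_mul_left _ _ _).symm

-- an element of the universe lies in some clipped event iff it lies in some event
theorem pvCount_pos_iff (u : List Int) (e : List (List Int)) (x : Int) (hxu : x ∈ u) :
    ((List.range e.length).countP (fun i =>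
        decide (x ∈ (e.map (fun a => PySem.Set.inter (PySem.Set.ofList a) u)).getD i []))) ≠ 0
      ↔ e.any (fun a => decide (x ∈ a)) = true := by
  rw [Ne, List.countP_eq_zero, List.any_eq_true]
  push Not
  constructor
  · rintro ⟨i, hi, hmem⟩
    rw [List.mem_range] at hi
    have hi' : i < (e.map (fun a => PySem.Set.inter (PySem.Set.ofList a) u)).length := by
      simpa using hi
    rw [List.getD_eq_getElem _ _ hi', List.getElem_map] at hmem
    simp only [decide_eq_true_eq] at hmem
    rw [PySem.Set.mem_inter, PySem.Set.mem_ofList] at hmem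
    exact ⟨e[i], List.getElem_mem hi, by simpa using hmem.1⟩
  · rintro ⟨a, ha, hx⟩
    simp only [decide_eq_true_eq] at hx
    obtain ⟨i, hi, rfl⟩ := List.mem_iff_getElem.mp ha
    refine ⟨i, List.mem_range.mpr hi, ?_⟩
    have hi' : i < (e.map (fun a => PySem.Set.inter (PySem.Set.ofList a) u)).length := by
      simpa using hi
    rw [List.getD_eq_getElem _ _ hi', List.getElem_map]
    simp only [decide_eq_true_eq]
    rw [PySem.Set.mem_inter, PySem.Set.mem_ofList]
    exact ⟨hx, hxu⟩

-- the alternating binomial sum seen by one element of the universe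
theorem pvPerX (u : List Int) (e : List (List Int)) (x : Int) :
    ((List.range e.length).map (fun j => (-1 : Int) ^ j *
        ((((List.range e.length).countP (fun i =>
            decide (x ∈ (e.map (fun a => PySem.Set.inter (PySem.Set.ofList a) u)).getD i []))).choose (j + 1)) : Int))).sum
      = if ((List.range e.length).countP (fun i =>
            decide (x ∈ (e.map (fun a => PySem.Set.inter (PySem.Set.ofList a) u)).getD i []))) = 0
        then (0 : Int) else 1 := by
  have hkm : (List.range e.length).countP (fun i =>
      decide (x ∈ (e.map (fun a => PySem.Set.inter (PySem.Set.ofList a) u)).getD i [])) ≤ e.length := by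
    simpa using List.countP_le_length (p := fun i =>
      decide (x ∈ (e.map (fun a => PySem.Set.inter (PySem.Set.ofList a) u)).getD i [])) (l := List.range e.length)
  exact pvAltSum e.length _ hkm

-- a 0/1 if-then-else flipped into countP form
theorem pvIteFlip (k : Nat) : (if k = 0 then (0 : Int) else 1)
    = (if (decide (k ≠ 0)) = true then (1 : Int) else 0) := by
  by_cases h : k = 0 <;> simp [h]

-- ===== VERDICT (by name: the statement is the Claim_ definition above) =====
theorem inclusion_exclusion_union_size_spec : Claim_equal_inclusion_exclusion_union_size := by
  intro u e _
  unfold Spec_inclusion_exclusion_union_size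
  rw [pvAlt_char]
  unfold inclusion_exclusion_union_size
  by_cases he : e.length = 0
  · rw [if_pos he]
    have : e = [] := List.length_eq_zero_iff.mp he
    subst this
    simp
  · rw [if_neg he]
    simp only [PySem.List.foldl_add, zero_add]
    rw [PySem.List.pyRange_one]
    have hmt : ((e.length : Int) + 1 - 1).toNat = e.length := by omega
    rw [hmt, List.map_map]
    simp only [Function.comp_def, pvToNat, pvSign, pvTermLen]
    rw [pvSumCongr (List.range e.length)
        (fun j _ => pvInnerSum (PySem.Set.ofList u) e.length j
          (e.map (fun a => PySem.Set.inter (PySem.Set.ofList a) u)))]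
    rw [pvSum_comm]
    rw [pvSumCongr (PySem.Set.ofList u) (fun x _ => pvPerX u e x)]
    rw [pvSumCongr (PySem.Set.ofList u) (fun x _ => pvIteFlip _)]
    rw [PySem.List.sum_map_ite_one_zero]
    refine congrArg _ (List.countP_congr ?_)
    intro x hx
    rw [decide_eq_true_eq]
    exact pvCount_pos_iff u e x ((PySem.Set.mem_ofList u x).mp hx)
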